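-- pv_equiv track=rewrite | github.com/edri2or-commits/project38-or | src/doc_updater.py | _find_unreleased_section
-- ===== SOURCE A (Python) =====
-- def _find_unreleased_section(content: str) -> tuple[int, int]:
--     """Find the [Unreleased] section boundaries in changelog.
--
--     Args:
--         content: Full changelog content
--
--     Returns:
--         Tuple of (start_line, end_line) indices
--
--     Raises:
--         ValueError: If [Unreleased] section not found
--     """
--     lines = content.split("\n")
--
--     # Find [Unreleased] header
--     unreleased_idx = None
--     for i, line in enumerate(lines):
--         if "[Unreleased]" in line:
--             unreleased_idx = i
--             break
--
--     if unreleased_idx is None: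
--         raise ValueError("Could not find [Unreleased] section in changelog")
--
--     # Find next version section (starts with ##)
--     next_section_idx = len(lines)
--     for i in range(unreleased_idx + 1, len(lines)):
--         if lines[i].startswith("## [") and "[Unreleased]" not in lines[i]:
--             next_section_idx = i
--             break
--
--     return unreleased_idx, next_section_idx
-- ===== SOURCE B (Python) =====
-- def _find_unreleased_section(content: str) -> tuple[int, int]:
--     lines = content.split("\n")
--     ans = None
--     next_hdr = len(lines)
--     for i in range(len(lines) - 1, -1, -1):
--         line = lines[i]
--         if "[Unreleased]" in line:
--             ans = (i, next_hdr)
--         elif line.startswith("## ["):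
--             next_hdr = i
--     if ans is None:
--         raise ValueError("Could not find [Unreleased] section in changelog")
--     return ans
-- ===== Notes on version B (the rewrite author's own statement) =====
-- stated objective: alternative
-- what changed: B replaces A's forward search plus inner forward break-scan by a single right-to-left pass that maintains the nearest following '## [' header index as an accumulator, pairing each '[Unreleased]' line with it (the leftmost one wins by overwriting).
import Mathlib
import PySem

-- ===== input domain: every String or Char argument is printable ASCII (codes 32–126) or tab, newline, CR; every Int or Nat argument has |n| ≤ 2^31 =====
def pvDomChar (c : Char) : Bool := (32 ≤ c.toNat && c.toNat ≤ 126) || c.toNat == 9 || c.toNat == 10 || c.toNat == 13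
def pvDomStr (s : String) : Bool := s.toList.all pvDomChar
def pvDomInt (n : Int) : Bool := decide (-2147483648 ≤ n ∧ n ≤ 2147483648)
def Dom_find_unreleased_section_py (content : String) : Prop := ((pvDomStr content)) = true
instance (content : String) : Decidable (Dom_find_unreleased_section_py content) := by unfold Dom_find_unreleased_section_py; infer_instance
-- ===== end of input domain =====

-- B finds the section in one right-to-left pass keeping the nearest following header index as an accumulator; objective: alternative.


-- ===== PORT A =====
-- A's first loop: for i, line in enumerate(lines): if "[Unreleased]" in line: break
def pvAFind (lines : List String) (i : Nat) : Option Nat :=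
  match lines with
  | [] => none
  | l :: ls => if PySem.Str.isIn "[Unreleased]" l then some i else pvAFind ls (i + 1)

-- A's second loop: for i in range(u+1, len(lines)): if lines[i].startswith("## [") and …: break
def pvANext (lines : List String) (r : List Int) : Int :=
  match r with
  | [] => PySem.List.len lines
  | i :: rest =>
    let li := PySem.List.pyGetD lines i ""
    if PySem.Str.startswith li "## [" && !PySem.Str.isIn "[Unreleased]" li then i
    else pvANext lines rest

-- lines = content.split("\n"); the separator is the non-empty literal "\n", so split? is always `some`
def pvAMain (lines : List String) : Int × Int :=
  match pvAFind lines 0 with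
  | none => (-1, -1)   -- Python raises ValueError here; outside Pre_
  | some u => ((u : Int), pvANext lines (PySem.List.pyRange ((u : Int) + 1) (PySem.List.len lines) 1))

def find_unreleased_section_py (content : String) : Int × Int :=
  pvAMain ((PySem.Str.split? content "\n").getD [])

-- ===== PORT B =====
-- B's reverse pass (the descending for-loop as right-to-left structural recursion):
-- returns (ans, next_hdr) for the suffix of the lines starting at index i; n = len(lines).
def pvBGo (lines : List String) (i n : Nat) : Option (Int × Int) × Int :=
  match lines with
  | [] => (none, (n : Int))
  | l :: rest =>
    let st := pvBGo rest (i + 1) n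
    if PySem.Str.isIn "[Unreleased]" l then (some ((i : Int), st.2), st.2)
    else if PySem.Str.startswith l "## [" then (st.1, (i : Int))
    else st

def pvBMain (lines : List String) : Int × Int :=
  match (pvBGo lines 0 lines.length).1 with
  | none => (-1, -1)   -- Python raises ValueError here; outside Pre_
  | some p => p

def find_unreleased_section_py_alt (content : String) : Int × Int :=
  pvBMain ((PySem.Str.split? content "\n").getD [])

-- ===== PRECONDITION & SPEC =====
-- Pre_ excludes exactly the inputs where Python A raises ValueError: no line contains "[Unreleased]".
def Pre_find_unreleased_section_py (content : String) : Prop :=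
  ∃ l ∈ (PySem.Str.split? content "\n").getD [], PySem.Str.isIn "[Unreleased]" l = true
instance (content : String) : Decidable (Pre_find_unreleased_section_py content) := by
  unfold Pre_find_unreleased_section_py; infer_instance
def pvWitness_find_unreleased_section_py : String :=
  "# Changelog\n## [Unreleased]\n- x\n## [1.0.0]\n- y"

def Spec_find_unreleased_section_py (content : String) (out : Int × Int) : Prop := out = find_unreleased_section_py_alt content
instance (content : String) (out : Int × Int) : Decidable (Spec_find_unreleased_section_py content out) := by unfold Spec_find_unreleased_section_py; infer_instance

-- ===== CLAIM (what is proved, stated in full; the proofs are below) =====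
def Claim_equal_find_unreleased_section_py : Prop := ∀ (content : String), Dom_find_unreleased_section_py content → Pre_find_unreleased_section_py content → Spec_find_unreleased_section_py content (find_unreleased_section_py content)

-- ===== LEMMAS AND PROOFS =====

-- Invariant of B's reverse pass on the suffix starting at i:
-- its answer component is A's two staged searches restricted to that suffix, and
-- its header accumulator is A's range scan started at i.
theorem pvBGo_eq (lines : List String) (i : Nat) (hi : i ≤ lines.length) :
    pvBGo (lines.drop i) i lines.length
      = ( (match pvAFind (lines.drop i) i with
           | none => none
           | some u => some ((u : Int), pvANext lines (PySem.List.pyRange ((u : Int) + 1) (PySem.List.len lines) 1))),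
          pvANext lines (PySem.List.pyRange (i : Int) (PySem.List.len lines) 1) ) := by
  induction hn : lines.length - i generalizing i with
  | zero =>
    have hie : i = lines.length := by omega
    subst hie
    simp [pvBGo, pvAFind, pvANext, PySem.List.len_eq]
  | succ k ih =>
    have hil : i < lines.length := by omega
    rw [List.drop_eq_getElem_cons hil]
    have hget : PySem.List.pyGetD lines (i : Int) "" = lines[i] := by
      simp [PySem.List.pyGetD_natCast, List.getD_eq_getElem?_getD, hil]
    have hrange : PySem.List.pyRange (i : Int) (PySem.List.len lines) 1
        = (i : Int) :: PySem.List.pyRange ((i : Int) + 1) (PySem.List.len lines) 1 :=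
      PySem.List.pyRange_one_cons (by simp [PySem.List.len_eq]; exact_mod_cast hil)
    have ihs := ih (i + 1) (by omega) (by omega)
    rw [show ((i : Nat) + 1 : Nat) = i + 1 from rfl] at ihs
    simp only [pvBGo, pvAFind, ihs, hrange]
    by_cases hU : PySem.Str.isIn "[Unreleased]" lines[i] = true <;>
      by_cases hH : PySem.Str.startswith lines[i] "## [" = true <;>
      cases hF : pvAFind (lines.drop (i + 1)) (i + 1) <;>
      simp [pvANext, hget, Nat.cast_add, Nat.cast_one] <;> simp_all

theorem pvMain_eq (lines : List String) : pvAMain lines = pvBMain lines := by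
  unfold pvAMain pvBMain
  have h := pvBGo_eq lines 0 (Nat.zero_le _)
  simp only [List.drop_zero, Nat.cast_zero] at h
  rw [h]
  cases pvAFind lines 0 <;> rfl

-- ===== VERDICT (by name: the statement is the Claim_ definition above) =====
theorem find_unreleased_section_py_spec : Claim_equal_find_unreleased_section_py := by
  intro content _ _
  unfold Spec_find_unreleased_section_py find_unreleased_section_py find_unreleased_section_py_alt
  exact pvMain_eq _
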